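-- pv_equiv track=rewrite | github.com/ShrykeWindgrace/Converter_4s_to_html | Main.py | stack_to_html
-- ===== SOURCE A (Python) =====
-- def html_wrap(text, el_type="div", el_class="", cr=True, **kwargs):
--     kwline = ""
--     for k, v in kwargs.items():
--         kwline += ' '+str(k) + '=' + '"' + str(v) + '"'
--     kwline += ' '
--     if len(el_type) == 0:
--         return text
--     if len(el_class) > 0:
--         cl_field = r" class={1} "
--     else:
--         cl_field = ""
--
--     if cr:
--         car_return = "\n"
--     else:
--         car_return = ""
--
--     if len(text) == 0:
--         return ("<{0}"+cl_field+kwline+"/>").format(el_type, el_class)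
--     else:
--         return ("<{0}"+cl_field+kwline+">"+car_return+text+car_return+"</{0}>").format(el_type, el_class)
--
-- def li_wrap(text):
--     return html_wrap(text, el_type="li", el_class="", cr=False)
--
-- tokens = {
--     "###LJ": {},  # will ignore it
--     "###": {},  # заголовок
--     "#EDITOR": {},  # редактор
--     "#DATE": {},
--     "#": {},  # generic comment
--     "?": {'html_text': "Вопрос ", 'html_class': "question"},  # question text
--     "!": {'html_text': "Ответ(ы): ", 'html_class': "answer"},  # answer
--     "^": {'html_text': "Источник(и): ", 'html_class': "source"},  # source
--     "№№": {},  # set question number and continue with that numbering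
--     "№": {},  # set one question number
--     "=": {'html_text': "Зачёт: ", 'html_class': "answer"},  # other correct answers
--     "/": {'html_text': "Комментарии: ", 'html_class': "comments"},  # comments to answer
--     "@": {'html_text': "Автор(ы): ", 'html_class': "author"},  # authors
--     "-": {},  # list
-- }
--
-- def stack_to_html(stack):
--     out = ""
--     if len(stack) > 0:
--         token, text = stack.pop()
--         info = tokens.get(token, {})
--         if token in ['@', '!', '^', '/', '=']:
--             t = html_wrap(info.get('html_text', ""), el_class="field_header", cr=False)
--             treat = flush_list(stack)
--             out += html_wrap(text=t + text + treat, el_class=info.get('html_class', ""))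
--             return out + "\n" + stack_to_html(stack=stack)
--         elif token == '?':
--             return html_wrap(html_wrap(info.get("html_text", ""), el_class="question_header")
--                              + text
--                              + flush_list(stack)
--                              + stack_to_html(stack),
--                              el_class=info.get("html_class"),)
--         else:
--             return "still can't process " + token + ' ' + text + stack_to_html(stack)
--             # elif token == '!':
--
--     else:
--         return out
--
-- def flush_list(stack):
--     treat = ""
--     if (len(stack) > 0) and (stack[-1][0] == '-'):
--         while (len(stack) > 0) and (stack[-1][0] == '-'):
--             treat += '\n' + li_wrap(stack.pop()[1])
--         treat = html_wrap(text=treat, el_type='ol', cr=False)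
--     return treat
-- ===== SOURCE B (Python) =====
-- def html_wrap(text, el_type="div", el_class="", cr=True, **kwargs):
--     kwline = ""
--     for k, v in kwargs.items():
--         kwline += ' '+str(k) + '=' + '"' + str(v) + '"'
--     kwline += ' '
--     if len(el_type) == 0:
--         return text
--     if len(el_class) > 0:
--         cl_field = r" class={1} "
--     else:
--         cl_field = ""
--     if cr:
--         car_return = "\n"
--     else:
--         car_return = ""
--     if len(text) == 0:
--         return ("<{0}"+cl_field+kwline+"/>").format(el_type, el_class)
--     else:
--         return ("<{0}"+cl_field+kwline+">"+car_return+text+car_return+"</{0}>").format(el_type, el_class)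
--
-- def li_wrap(text):
--     return html_wrap(text, el_type="li", el_class="", cr=False)
--
-- tokens = {
--     "?": {'html_text': "Вопрос ", 'html_class': "question"},
--     "!": {'html_text': "Ответ(ы): ", 'html_class': "answer"},
--     "^": {'html_text': "Источник(и): ", 'html_class': "source"},
--     "=": {'html_text': "Зачёт: ", 'html_class': "answer"},
--     "/": {'html_text': "Комментарии: ", 'html_class': "comments"},
--     "@": {'html_text': "Автор(ы): ", 'html_class': "author"},
-- }
--
-- MAIN = ('@', '!', '^', '/', '=')
--
-- def stack_to_html(stack):
--     # Phase 1: empty the stack, recording one op per main token (with its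
--     # run of trailing '-' items) in pop order.
--     ops = []
--     while stack:
--         token, text = stack.pop()
--         items = []
--         if token in MAIN or token == '?':
--             while stack and stack[-1][0] == '-':
--                 items.append(stack.pop()[1])
--         ops.append((token, text, items))
--     # Phase 2: assemble from the end: each op combines with the suffix built so far.
--     result = ""
--     for token, text, items in reversed(ops):
--         treat = ""
--         if items:
--             treat = html_wrap("".join('\n' + li_wrap(it) for it in items),
--                               el_type='ol', cr=False)
--         info = tokens.get(token, {})
--         if token in MAIN:
--             t = html_wrap(info.get('html_text', ""), el_class="field_header", cr=False)
--             result = html_wrap(t + text + treat, el_class=info.get('html_class', "")) + "\n" + result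
--         elif token == '?':
--             result = html_wrap(html_wrap(info.get("html_text", ""), el_class="question_header")
--                                + text + treat + result,
--                                el_class=info.get("html_class"))
--         else:
--             result = "still can't process " + token + ' ' + text + result
--     return result
-- ===== Notes on version B (the rewrite author's own statement) =====
-- stated objective: alternative
-- what changed: A's mutually recursive renderer (stack_to_html re-entering itself and flush_list) is replaced by a two-phase iteration: one loop empties the stack into a list of (token, text, dash-run) operations in pop order, then a reverse fold over that list assembles the HTML string.
-- outside the precondition, e.g. on stack_to_html([('!', '{')]): A raises ValueError, B raises ValueError
import Mathlib
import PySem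

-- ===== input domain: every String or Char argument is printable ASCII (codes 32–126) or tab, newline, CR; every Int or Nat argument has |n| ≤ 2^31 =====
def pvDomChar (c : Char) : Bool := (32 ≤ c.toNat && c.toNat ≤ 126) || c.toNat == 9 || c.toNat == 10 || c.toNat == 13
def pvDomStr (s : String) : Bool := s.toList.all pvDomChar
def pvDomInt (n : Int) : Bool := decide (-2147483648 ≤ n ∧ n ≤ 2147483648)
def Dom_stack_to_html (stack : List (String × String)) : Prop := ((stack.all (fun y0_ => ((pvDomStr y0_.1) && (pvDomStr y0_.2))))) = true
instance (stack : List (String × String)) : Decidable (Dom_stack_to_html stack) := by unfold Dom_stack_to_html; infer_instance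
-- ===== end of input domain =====

-- B replaces A's mutual recursion by a pop-all loop plus a reverse fold (alternative
-- decomposition, same cost).  NOTE: the Python A (and B) empties the `stack` argument
-- in place; the equivalence proved here is about the RETURN value only.

-- ===== PORT A =====
-- shared module helpers: html_wrap (kwargs never passed, so kwline = " "), li_wrap,
-- and the `tokens` dict read only through .get on its two fields.
def html_wrapA (text : String) (el_type : String) (el_class : String) (cr : Bool) : String :=
  let kwline := " "
  if el_type = "" then text
  else
    let cl_field := if el_class ≠ "" then " class=" ++ el_class ++ " " else ""
    let car_return := if cr then "\n" else ""
    -- Python builds these via str.format; Pre_ excludes braces in every string that reaches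
    -- format, and on that domain format is plain splicing, as written here.
    if text = "" then "<" ++ el_type ++ cl_field ++ kwline ++ "/>"
    else "<" ++ el_type ++ cl_field ++ kwline ++ ">" ++ car_return ++ text ++ car_return
         ++ "</" ++ el_type ++ ">"

def li_wrapA (text : String) : String := html_wrapA text "li" "" false

def tokenText (t : String) : String :=
  if t = "?" then "Вопрос " else if t = "!" then "Ответ(ы): "
  else if t = "^" then "Источник(и): " else if t = "=" then "Зачёт: "
  else if t = "/" then "Комментарии: " else if t = "@" then "Автор(ы): " else ""

def tokenClass (t : String) : String :=
  if t = "?" then "question" else if t = "!" then "answer"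
  else if t = "^" then "source" else if t = "=" then "answer"
  else if t = "/" then "comments" else if t = "@" then "author" else ""

-- the while-loop inside flush_list: pop trailing '-' entries, accumulating the string
def flushLoopA (stack : List (String × String)) (treat : String) :
    String × List (String × String) :=
  match h : stack.getLast? with
  | some p =>
    if p.1 = "-" then flushLoopA stack.dropLast (treat ++ "\n" ++ li_wrapA p.2)
    else (treat, stack)
  | none => (treat, stack)
termination_by stack.length
decreasing_by
  cases stack with
  | nil => simp at h
  | cons a l => simp [List.length_dropLast]

theorem flushLoopA_len (stack : List (String × String)) (treat : String) :
    (flushLoopA stack treat).2.length ≤ stack.length := by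
  fun_induction flushLoopA stack treat with
  | case1 s t p h hdash ih =>
      have hd : s.dropLast.length ≤ s.length := by simp [List.length_dropLast]
      exact le_trans ih hd
  | case2 => simp [*]
  | case3 => simp [*]

def flush_listA (stack : List (String × String)) : String × List (String × String) :=
  match stack.getLast? with
  | some p =>
    if p.1 = "-" then
      let r := flushLoopA stack ""
      (html_wrapA r.1 "ol" "" false, r.2)
    else ("", stack)
  | none => ("", stack)

theorem flush_listA_len (stack : List (String × String)) :
    (flush_listA stack).2.length ≤ stack.length := by
  unfold flush_listA
  cases h : stack.getLast? with
  | none => simp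
  | some p =>
    by_cases hd : p.1 = "-" <;> simp [hd, flushLoopA_len]

def stack_to_html (stack : List (String × String)) : String :=
  match h : stack.getLast? with
  | none => ""
  | some (token, text) =>
    let stack1 := stack.dropLast
    if token = "@" ∨ token = "!" ∨ token = "^" ∨ token = "/" ∨ token = "=" then
      let t := html_wrapA (tokenText token) "div" "field_header" false
      let r := flush_listA stack1
      html_wrapA (t ++ text ++ r.1) "div" (tokenClass token) true ++ "\n" ++ stack_to_html r.2
    else if token = "?" then
      let r := flush_listA stack1
      html_wrapA (html_wrapA (tokenText token) "div" "question_header" true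
                  ++ text ++ r.1 ++ stack_to_html r.2)
        "div" (tokenClass token) true
    else
      "still can't process " ++ token ++ " " ++ text ++ stack_to_html stack1
termination_by stack.length
decreasing_by
  · cases stack with
    | nil => simp at h
    | cons a l =>
      have h1 : (flush_listA (a :: l).dropLast).2.length ≤ (a :: l).dropLast.length :=
        flush_listA_len _
      have h2 : (a :: l).dropLast.length = (a :: l).length - 1 := List.length_dropLast
      have h3 : (a :: l).length = l.length + 1 := List.length_cons
      omega
  · cases stack with
    | nil => simp at h
    | cons a l =>
      have h1 : (flush_listA (a :: l).dropLast).2.length ≤ (a :: l).dropLast.length :=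
        flush_listA_len _
      have h2 : (a :: l).dropLast.length = (a :: l).length - 1 := List.length_dropLast
      have h3 : (a :: l).length = l.length + 1 := List.length_cons
      omega
  · cases stack with
    | nil => simp at h
    | cons a l => simp [List.length_dropLast]

-- ===== PORT B =====
-- phase-1 inner loop: pop the run of trailing '-' entries, texts kept in pop order
def popRunB (stack : List (String × String)) : List String × List (String × String) :=
  match h : stack.getLast? with
  | some p =>
    if p.1 = "-" then
      let r := popRunB stack.dropLast
      (p.2 :: r.1, r.2)
    else ([], stack)
  | none => ([], stack)
termination_by stack.length
decreasing_by
  cases stack with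
  | nil => simp at h
  | cons a l => simp [List.length_dropLast]

theorem popRunB_len (stack : List (String × String)) :
    (popRunB stack).2.length ≤ stack.length := by
  fun_induction popRunB stack with
  | case1 s p h hdash r ih =>
      have hd : s.dropLast.length ≤ s.length := by simp [List.length_dropLast]
      exact le_trans ih hd
  | case2 => simp [*]
  | case3 => simp [*]

-- phase 1: empty the stack into a list of operations in pop order
def collectB (stack : List (String × String)) : List (String × String × List String) :=
  match h : stack.getLast? with
  | none => []
  | some (token, text) =>
    let stack1 := stack.dropLast
    if token = "@" ∨ token = "!" ∨ token = "^" ∨ token = "/" ∨ token = "=" ∨ token = "?" then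
      let r := popRunB stack1
      (token, text, r.1) :: collectB r.2
    else
      (token, text, []) :: collectB stack1
termination_by stack.length
decreasing_by
  · cases stack with
    | nil => simp at h
    | cons a l =>
      have h1 : (popRunB (a :: l).dropLast).2.length ≤ (a :: l).dropLast.length :=
        popRunB_len _
      have h2 : (a :: l).dropLast.length = (a :: l).length - 1 := List.length_dropLast
      have h3 : (a :: l).length = l.length + 1 := List.length_cons
      omega
  · cases stack with
    | nil => simp at h
    | cons a l => simp [List.length_dropLast]

-- phase 2: one op combined with the suffix already assembled
def combineB (op : String × String × List String) (suffix : String) : String :=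
  let token := op.1
  let text := op.2.1
  let items := op.2.2
  let treat :=
    if items.isEmpty then ""
    else html_wrapA (items.foldl (fun acc it => acc ++ "\n" ++ li_wrapA it) "") "ol" "" false
  if token = "@" ∨ token = "!" ∨ token = "^" ∨ token = "/" ∨ token = "=" then
    let t := html_wrapA (tokenText token) "div" "field_header" false
    html_wrapA (t ++ text ++ treat) "div" (tokenClass token) true ++ "\n" ++ suffix
  else if token = "?" then
    html_wrapA (html_wrapA (tokenText token) "div" "question_header" true
                ++ text ++ treat ++ suffix)
      "div" (tokenClass token) true
  else
    "still can't process " ++ token ++ " " ++ text ++ suffix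

def stack_to_html_alt (stack : List (String × String)) : String :=
  (collectB stack).foldr combineB ""

-- ===== PRECONDITION & SPEC =====
-- Pre_ excludes stacks in which '{' or '}' occurs in a string that reaches str.format inside
-- html_wrap (the text of a '@','!','^','/','=','?' entry, the text of a '-' entry consumed by
-- flush_list, or any component of an entry lying below a '?'): there Python raises
-- ValueError/KeyError/IndexError or substitutes '{0}'/'{1}' placeholders from the data.
def pvBraceFree (s : String) : Bool := s.toList.all (fun c => !(c == '{') && !(c == '}'))
def pvMainQ (t : String) : Bool :=
  t == "@" || t == "!" || t == "^" || t == "/" || t == "=" || t == "?"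
def pvPre (stack : List (String × String)) : Bool :=
  (List.range stack.length).all fun i =>
    let p := stack.getD i ("", "")
    (!((List.range stack.length).any fun j => decide (i < j) && (stack.getD j ("", "")).1 == "?")
       || (pvBraceFree p.1 && pvBraceFree p.2))
    && (!(pvMainQ p.1) || pvBraceFree p.2)
    && (!(p.1 == "-" &&
          ((List.range stack.length).any fun j =>
            decide (i < j) && pvMainQ (stack.getD j ("", "")).1 &&
              ((List.range stack.length).all fun k =>
                !(decide (i < k) && decide (k < j)) || (stack.getD k ("", "")).1 == "-")))
       || pvBraceFree p.2)
def Pre_stack_to_html (stack : List (String × String)) : Prop := pvPre stack = true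
instance (stack : List (String × String)) : Decidable (Pre_stack_to_html stack) := by
  unfold Pre_stack_to_html; infer_instance

def pvWitness_stack_to_html : (List (String × String)) :=
  [("?", "q"), ("-", "item"), ("!", "ans")]

def Spec_stack_to_html (stack : List (String × String)) (out : String) : Prop :=
  out = stack_to_html_alt stack
instance (stack : List (String × String)) (out : String) :
    Decidable (Spec_stack_to_html stack out) := by unfold Spec_stack_to_html; infer_instance

-- ===== CLAIM (what is proved, stated in full; the proofs are below) =====
def Claim_equal_stack_to_html : Prop :=
  ∀ (stack : List (String × String)), Dom_stack_to_html stack →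
    Pre_stack_to_html stack → Spec_stack_to_html stack (stack_to_html stack)

-- ===== LEMMAS AND PROOFS =====

-- the `treat` B builds from a run of '-' items (helper for the bridging lemmas only)
def combineTreat (items : List String) : String :=
  if items.isEmpty then ""
  else html_wrapA (items.foldl (fun acc it => acc ++ "\n" ++ li_wrapA it) "") "ol" "" false

theorem popRunB_none (stack : List (String × String)) (h : stack.getLast? = none) :
    popRunB stack = ([], stack) := by
  rw [popRunB]; split <;> simp_all

theorem popRunB_dash (stack : List (String × String)) (p : String × String)
    (h : stack.getLast? = some p) (hd : p.1 = "-") :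
    popRunB stack = (p.2 :: (popRunB stack.dropLast).1, (popRunB stack.dropLast).2) := by
  rw [popRunB]; split <;> simp_all

theorem popRunB_nodash (stack : List (String × String)) (p : String × String)
    (h : stack.getLast? = some p) (hd : p.1 ≠ "-") :
    popRunB stack = ([], stack) := by
  rw [popRunB]; split <;> simp_all

theorem collectB_none (stack : List (String × String)) (h : stack.getLast? = none) :
    collectB stack = [] := by
  rw [collectB]; split <;> simp_all

theorem collectB_run (stack : List (String × String)) (token text : String)
    (h : stack.getLast? = some (token, text))
    (hm : token = "@" ∨ token = "!" ∨ token = "^" ∨ token = "/" ∨ token = "=" ∨ token = "?") :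
    collectB stack =
      (token, text, (popRunB stack.dropLast).1) :: collectB (popRunB stack.dropLast).2 := by
  rw [collectB]; split <;> simp_all

theorem collectB_other (stack : List (String × String)) (token text : String)
    (h : stack.getLast? = some (token, text))
    (hm : ¬ (token = "@" ∨ token = "!" ∨ token = "^" ∨ token = "/" ∨ token = "=" ∨ token = "?")) :
    collectB stack = (token, text, []) :: collectB stack.dropLast := by
  rw [collectB]; split <;> simp_all

theorem stack_to_html_none (stack : List (String × String)) (h : stack.getLast? = none) :
    stack_to_html stack = "" := by
  rw [stack_to_html]; split <;> simp_all

theorem stack_to_html_main (stack : List (String × String)) (token text : String)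
    (h : stack.getLast? = some (token, text))
    (hm : token = "@" ∨ token = "!" ∨ token = "^" ∨ token = "/" ∨ token = "=") :
    stack_to_html stack =
      html_wrapA (html_wrapA (tokenText token) "div" "field_header" false
                  ++ text ++ (flush_listA stack.dropLast).1)
        "div" (tokenClass token) true
      ++ "\n" ++ stack_to_html (flush_listA stack.dropLast).2 := by
  rw [stack_to_html]; split <;> simp_all

theorem stack_to_html_q (stack : List (String × String)) (token text : String)
    (h : stack.getLast? = some (token, text))
    (hm : ¬ (token = "@" ∨ token = "!" ∨ token = "^" ∨ token = "/" ∨ token = "="))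
    (hq : token = "?") :
    stack_to_html stack =
      html_wrapA (html_wrapA (tokenText token) "div" "question_header" true
                  ++ text ++ (flush_listA stack.dropLast).1
                  ++ stack_to_html (flush_listA stack.dropLast).2)
        "div" (tokenClass token) true := by
  rw [stack_to_html]; split <;> simp_all

theorem stack_to_html_other (stack : List (String × String)) (token text : String)
    (h : stack.getLast? = some (token, text))
    (hm : ¬ (token = "@" ∨ token = "!" ∨ token = "^" ∨ token = "/" ∨ token = "="))
    (hq : token ≠ "?") :
    stack_to_html stack =
      "still can't process " ++ token ++ " " ++ text ++ stack_to_html stack.dropLast := by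
  rw [stack_to_html]; split <;> simp_all

-- A's flush-loop string equals B's run folded below the accumulator
theorem flushLoopA_eq (stack : List (String × String)) (treat : String) :
    flushLoopA stack treat =
      ((popRunB stack).1.foldl (fun acc it => acc ++ "\n" ++ li_wrapA it) treat,
       (popRunB stack).2) := by
  fun_induction flushLoopA stack treat with
  | case1 s t p h hdash ih =>
      rw [popRunB_dash s p h hdash]
      simpa using ih
  | case2 s t p h hdash => rw [popRunB_nodash s p h hdash]; simp
  | case3 s t h => rw [popRunB_none s h]; simp

-- A's flush_list equals B's run wrapped by combineTreat, with the same remaining stack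
theorem flush_listA_eq (stack : List (String × String)) :
    flush_listA stack = (combineTreat (popRunB stack).1, (popRunB stack).2) := by
  unfold flush_listA
  cases h : stack.getLast? with
  | none => rw [popRunB_none stack h]; simp [combineTreat]
  | some p =>
    by_cases hd : p.1 = "-"
    · simp only [hd, if_pos, flushLoopA_eq]
      rw [popRunB_dash stack p h hd]
      simp [combineTreat]
    · rw [popRunB_nodash stack p h hd]
      simp [hd, combineTreat]

theorem main_eq (n : Nat) :
    ∀ stack : List (String × String), stack.length ≤ n →
      stack_to_html stack = (collectB stack).foldr combineB "" := by
  induction n with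
  | zero =>
    intro stack hlen
    have hnil : stack = [] := List.eq_nil_of_length_eq_zero (Nat.le_zero.mp hlen)
    subst hnil
    rw [stack_to_html_none [] rfl, collectB_none [] rfl]
    rfl
  | succ n ih =>
    intro stack hlen
    cases hl : stack.getLast? with
    | none =>
      rw [stack_to_html_none stack hl, collectB_none stack hl]
      rfl
    | some p =>
      obtain ⟨token, text⟩ := p
      have hne : stack ≠ [] := by intro hnil; subst hnil; simp at hl
      have hdl : stack.dropLast.length ≤ n := by
        have h1 : stack.dropLast.length = stack.length - 1 := List.length_dropLast
        have h2 : 0 < stack.length := List.length_pos_iff.mpr hne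
        omega
      have hrun : (popRunB stack.dropLast).2.length ≤ n :=
        le_trans (popRunB_len _) hdl
      by_cases hmain : token = "@" ∨ token = "!" ∨ token = "^" ∨ token = "/" ∨ token = "="
      · have hm6 : token = "@" ∨ token = "!" ∨ token = "^" ∨ token = "/" ∨ token = "="
            ∨ token = "?" := by tauto
        rw [stack_to_html_main stack token text hl hmain,
            collectB_run stack token text hl hm6, List.foldr_cons,
            flush_listA_eq, ih _ hrun]
        simp [combineB, combineTreat, hmain]
      · by_cases hq : token = "?"
        · have hm6 : token = "@" ∨ token = "!" ∨ token = "^" ∨ token = "/" ∨ token = "="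
              ∨ token = "?" := by tauto
          subst hq
          rw [stack_to_html_q stack "?" text hl hmain rfl,
              collectB_run stack "?" text hl hm6, List.foldr_cons,
              flush_listA_eq, ih _ hrun]
          simp [combineB, combineTreat]
        · have hm6 : ¬ (token = "@" ∨ token = "!" ∨ token = "^" ∨ token = "/" ∨ token = "="
              ∨ token = "?") := by tauto
          rw [stack_to_html_other stack token text hl hmain hq,
              collectB_other stack token text hl hm6, List.foldr_cons, ih _ hdl]
          simp [combineB, combineTreat, hmain, hq]

-- ===== VERDICT (by name: the statement is the Claim_ definition above) =====
theorem stack_to_html_spec : Claim_equal_stack_to_html := by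
  intro stack _ _
  unfold Spec_stack_to_html stack_to_html_alt
  exact main_eq stack.length stack le_rfl
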